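-- pv_equiv track=rewrite | github.com/PKSHATechnology-Research/camphr | camphr/pipelines/utils.py | correct_bio_tags
-- ===== SOURCE A (Python) =====
-- import copy
-- from enum import Enum
-- from typing import Callable, Iterable, List, Sequence, Tuple, TypeVar, Union
--
-- class BILUO(Enum):
--     B = "B"
--     I = "I"  # noqa: E741
--     L = "L"
--     U = "U"
--     O = "O"  # noqa: E741
--     UNKNOWN = "-"
--
-- B = BILUO.B
--
-- I = BILUO.I  # noqa: E741
--
-- L = BILUO.L
--
-- U = BILUO.U
--
-- O = BILUO.O  # noqa: E741
--
-- UNK = BILUO.UNKNOWN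
--
-- def biluo_type(tag: str) -> BILUO:
--     if tag.startswith("B-"):
--         return B
--     elif tag.startswith("I-"):
--         return I
--     elif tag.startswith("L-"):
--         return L
--     elif tag.startswith("U-"):
--         return U
--     elif tag == "O":
--         return O
--     return UNK
--
-- def deconstruct_biluo_tag(tag: str) -> Tuple[BILUO, str]:
--     """Deconstruct string tag into BILUO type and its body"""
--     biluo = biluo_type(tag)
--     if biluo == UNK:
--         return biluo, ""
--     if biluo == O:
--         return biluo, ""
--     return biluo, tag[2:]
--
-- def correct_bio_tags(tags: List[str]) -> List[str]:
--     """Check and correct bio tags list.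
--
--     All invalid tags will be replaced with `-`
--     """
--     tags = ["O"] + copy.copy(tags)
--     for i in range(len(tags) - 1):
--         tagl = tags[i]
--         tagr = tags[i + 1]
--
--         tl, bl = deconstruct_biluo_tag(tagl)
--         tr, br = deconstruct_biluo_tag(tagr)
--         if tl == UNK:
--             tags[i] == UNK.value
--         if tr == UNK:
--             tags[i + 1] == UNK.value
--
--         # right check
--         if tr == I and not (tl in {B, I} and bl == br):
--             # invalid pattern
--             tags[i + 1] = UNK.value
--     return tags[1:]
-- ===== SOURCE B (Python) =====
-- def correct_bio_tags(tags):
--     """Check and correct bio tags list.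
--
--     All invalid tags will be replaced with `-`
--
--     Run-based: an I-tag is exactly the string "I-" + body, so invalid stretches
--     come in runs of one identical string.  A whole run of "I-"+body is valid
--     iff the tag immediately before it is exactly "B-" + body (a B-tag is never
--     corrected, and a preceding same-body I-tag would belong to the run), so
--     each run is kept or wholly replaced by "-" in one decision, with no
--     correction state propagated tag by tag.
--     """
--     result = []
--     prev = None
--     rest = tags
--     while rest:
--         tag = rest[0]
--         rest = rest[1:]
--         if tag.startswith("I-"):
--             run = []
--             while rest and rest[0] == tag:
--                 run.append(rest[0])
--                 rest = rest[1:]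
--             if prev == "B" + tag[1:]:
--                 result.append(tag)
--                 result.extend(run)
--             else:
--                 result.extend(["-"] * (1 + len(run)))
--         else:
--             result.append(tag)
--         prev = tag
--     return result
-- ===== Notes on version B (the rewrite author's own statement) =====
-- stated objective: alternative
-- what changed: Instead of A's tag-by-tag pass over a sentinel-padded copy where each correction must propagate to the next check, B splits the input into runs of identical I-tags and decides each whole run at once: a run of 'I-'+body is kept iff the tag right before it is exactly 'B-'+body, otherwise the whole run becomes '-'; no corrected state is carried between tags.
import Mathlib
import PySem

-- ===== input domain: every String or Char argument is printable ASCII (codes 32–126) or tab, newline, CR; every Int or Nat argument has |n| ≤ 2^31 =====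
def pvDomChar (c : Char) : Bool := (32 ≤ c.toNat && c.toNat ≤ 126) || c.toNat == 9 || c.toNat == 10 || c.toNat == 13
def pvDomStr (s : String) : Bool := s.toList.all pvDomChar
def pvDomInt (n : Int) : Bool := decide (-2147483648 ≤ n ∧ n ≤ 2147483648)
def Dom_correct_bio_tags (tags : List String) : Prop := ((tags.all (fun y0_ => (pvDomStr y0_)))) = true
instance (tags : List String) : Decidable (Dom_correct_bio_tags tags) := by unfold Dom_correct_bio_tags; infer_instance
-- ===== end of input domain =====

-- B replaces A's tag-by-tag corrected-state pass over a sentinel-padded copy by a run-based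
-- algorithm: runs of identical I-tags are accepted or wholly replaced by "-" in one decision
-- keyed on the original tag before the run (objective: alternative); A's two dead '==' no-op
-- lines are dropped.  Neither version mutates the caller's list (A copies first).

-- ===== PORT A =====
inductive BILUO
  | B | I | L | U | O | UNKNOWN
deriving DecidableEq, Repr

def biluo_type (tag : String) : BILUO :=
  if PySem.Str.startswith tag "B-" then BILUO.B
  else if PySem.Str.startswith tag "I-" then BILUO.I
  else if PySem.Str.startswith tag "L-" then BILUO.L
  else if PySem.Str.startswith tag "U-" then BILUO.U
  else if tag = "O" then BILUO.O
  else BILUO.UNKNOWN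

def deconstruct_biluo_tag (tag : String) : BILUO × String :=
  let biluo := biluo_type tag
  if biluo = BILUO.UNKNOWN then (biluo, "")
  else if biluo = BILUO.O then (biluo, "")
  else (biluo, PySem.Str.slice tag (some 2) none)   -- tag[2:]

-- loop body of A's 'for i in range(len(tags) - 1)'.  The two 'tags[i] == UNK.value'
-- lines of A are '=='-comparisons (no-ops), hence omitted; indices i and i+1 are always
-- in range, so pyGetD/pySetD with default "" compute exactly Python's tags[i] reads and
-- the assignment tags[i + 1] = "-".
def correct_bio_tags_body (ts : List String) (i : Int) : List String :=
  let tagl := PySem.List.pyGetD ts i ""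
  let tagr := PySem.List.pyGetD ts (i + 1) ""
  let tl_bl := deconstruct_biluo_tag tagl
  let tr_br := deconstruct_biluo_tag tagr
  if tr_br.1 = BILUO.I ∧ ¬ ((tl_bl.1 = BILUO.B ∨ tl_bl.1 = BILUO.I) ∧ tl_bl.2 = tr_br.2) then
    PySem.List.pySetD ts (i + 1) "-"
  else ts

def correct_bio_tags (tags : List String) : List String :=
  let tags2 := ["O"] ++ tags
  let tags3 := (PySem.List.pyRange 0 ((tags2.length : Int) - 1) 1).foldl correct_bio_tags_body tags2
  PySem.List.slice tags3 (some 1) none   -- tags[1:]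

-- ===== PORT B =====
-- B's outer while loop, consuming 'rest'; the inner while loop collecting the run of
-- tags equal to 'tag' is List.takeWhile / List.dropWhile (exactly what it computes).
def goR (prev : Option String) (rest : List String) : List String :=
  match rest with
  | [] => []
  | tag :: rest' =>
    if PySem.Str.startswith tag "I-" then
      let run := rest'.takeWhile (· == tag)
      let rest'' := rest'.dropWhile (· == tag)
      (if prev = some ("B" ++ PySem.Str.slice tag (some 1) none) then tag :: run
       else List.replicate (1 + run.length) "-") ++ goR (some tag) rest''
    else tag :: goR (some tag) rest'
termination_by rest.length
decreasing_by
  · exact Nat.lt_succ_of_le (List.length_dropWhile_le _ _)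
  · simp

def correct_bio_tags_alt (tags : List String) : List String :=
  goR none tags

-- ===== PRECONDITION & SPEC =====
def Spec_correct_bio_tags (tags : List String) (out : List String) : Prop := out = correct_bio_tags_alt tags
instance (tags : List String) (out : List String) : Decidable (Spec_correct_bio_tags tags out) := by unfold Spec_correct_bio_tags; infer_instance

-- ===== CLAIM =====
def Claim_equal_correct_bio_tags : Prop := ∀ (tags : List String), Dom_correct_bio_tags tags → Spec_correct_bio_tags tags (correct_bio_tags tags)

-- ===== LEMMAS AND PROOFS =====

lemma startswith_isPrefixOf (tag p : String) :
    PySem.Str.startswith tag p = p.toList.isPrefixOf tag.toList := by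
  rw [PySem.Str.startswith_eq]; rfl

lemma eq_O_iff (tag : String) : tag = "O" ↔ tag.toList = ['O'] := by
  rw [← String.toList_inj]; constructor <;> intro h <;> simpa using h

-- A's deconstruction, on the character-list side
def deconL : List Char → BILUO × List Char
  | 'B' :: '-' :: b => (BILUO.B, b)
  | 'I' :: '-' :: b => (BILUO.I, b)
  | 'L' :: '-' :: b => (BILUO.L, b)
  | 'U' :: '-' :: b => (BILUO.U, b)
  | ['O'] => (BILUO.O, [])
  | _ => (BILUO.UNKNOWN, [])

lemma decon_toList (tag : String) :
    deconstruct_biluo_tag tag = ((deconL tag.toList).1, String.ofList (deconL tag.toList).2) := by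
  unfold deconstruct_biluo_tag biluo_type
  simp only [startswith_isPrefixOf, eq_O_iff]
  match h : tag.toList with
  | [] => simp [deconL]
  | [c] =>
    simp only [List.isPrefixOf, show ("B-").toList = ['B','-'] from rfl,
      show ("I-").toList = ['I','-'] from rfl, show ("L-").toList = ['L','-'] from rfl,
      show ("U-").toList = ['U','-'] from rfl]
    by_cases hc : c = 'O' <;> simp [hc, deconL]
  | c0 :: c1 :: rest =>
    simp only [List.isPrefixOf, show ("B-").toList = ['B','-'] from rfl,
      show ("I-").toList = ['I','-'] from rfl, show ("L-").toList = ['L','-'] from rfl,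
      show ("U-").toList = ['U','-'] from rfl]
    by_cases h1 : c1 = '-'
    · by_cases hB : c0 = 'B'
      · subst h1 hB
        simp [deconL]
        rw [← String.toList_inj]; simp [pysem, h]
      · by_cases hI : c0 = 'I'
        · subst h1 hI
          simp [deconL]
          rw [← String.toList_inj]; simp [pysem, h]
        · by_cases hL : c0 = 'L'
          · subst h1 hL
            simp [deconL]
            rw [← String.toList_inj]; simp [pysem, h]
          · by_cases hU : c0 = 'U'
            · subst h1 hU
              simp [deconL]
              rw [← String.toList_inj]; simp [pysem, h]
            · subst h1
              have hthis : deconL (c0 :: '-' :: rest) = (BILUO.UNKNOWN, []) := by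
                unfold deconL; split <;> simp_all
              simp [Ne.symm hB, Ne.symm hI, Ne.symm hL, Ne.symm hU, hthis]
    · have : deconL (c0 :: c1 :: rest) = (BILUO.UNKNOWN, []) := by
        unfold deconL; split <;> simp_all
      simp [Ne.symm h1, this]

-- A's loop, recast structurally: process 'rest' with previous (already corrected) tag 'p'
def goA (p : String) : List String → List String
  | [] => []
  | t :: rest =>
    let t' := if (deconstruct_biluo_tag t).1 = BILUO.I ∧
        ¬ (((deconstruct_biluo_tag p).1 = BILUO.B ∨ (deconstruct_biluo_tag p).1 = BILUO.I) ∧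
           (deconstruct_biluo_tag p).2 = (deconstruct_biluo_tag t).2) then "-" else t
    t' :: goA t' rest

lemma loopA_eq_goA (rest : List String) : ∀ (pre : List String) (p : String),
    (PySem.List.pyRange (pre.length : Int) ((pre.length : Int) + (rest.length : Int)) 1).foldl
      correct_bio_tags_body (pre ++ p :: rest) = pre ++ p :: goA p rest := by
  induction rest with
  | nil => intro pre p; rw [PySem.List.pyRange_one_eq_nil (by simp)]; simp [goA]
  | cons r rest ih =>
    intro pre p
    rw [PySem.List.pyRange_one_cons (by push_cast [List.length_cons]; omega)]
    simp only [List.foldl_cons]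
    have hbody : correct_bio_tags_body (pre ++ p :: r :: rest) (pre.length : Int)
        = pre ++ p :: (if (deconstruct_biluo_tag r).1 = BILUO.I ∧
            ¬ (((deconstruct_biluo_tag p).1 = BILUO.B ∨ (deconstruct_biluo_tag p).1 = BILUO.I) ∧
               (deconstruct_biluo_tag p).2 = (deconstruct_biluo_tag r).2) then "-" else r) :: rest := by
      unfold correct_bio_tags_body
      have hl : PySem.List.pyGetD (pre ++ p :: r :: rest) (pre.length : Int) "" = p := by
        rw [PySem.List.pyGetD_natCast]
        simp [List.getD]
      have hr : PySem.List.pyGetD (pre ++ p :: r :: rest) ((pre.length : Int) + 1) "" = r := by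
        rw [show ((pre.length : Int) + 1) = ((pre.length + 1 : Nat) : Int) by push_cast; ring,
          PySem.List.pyGetD_natCast]
        simp [List.getD]
      have hs : PySem.List.pySetD (pre ++ p :: r :: rest) ((pre.length : Int) + 1) "-"
          = pre ++ p :: "-" :: rest := by
        rw [show ((pre.length : Int) + 1) = ((pre.length + 1 : Nat) : Int) by push_cast; ring,
          PySem.List.pySetD_natCast, List.set_append]
        simp
      rw [hl, hr]
      split_ifs with hc
      · rw [hs]; simp [hc]
      · rw [if_neg hc]
    rw [hbody]
    have harr : (PySem.List.pyRange ((pre.length : Int) + 1) ((pre.length : Int) + ((r :: rest).length : Int)) 1)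
        = PySem.List.pyRange (((pre ++ [p]).length : Int)) (((pre ++ [p]).length : Int) + (rest.length : Int)) 1 := by
      congr 1 <;> push_cast [List.length_append, List.length_cons, List.length_nil] <;> ring
    set r' := (if (deconstruct_biluo_tag r).1 = BILUO.I ∧
        ¬ (((deconstruct_biluo_tag p).1 = BILUO.B ∨ (deconstruct_biluo_tag p).1 = BILUO.I) ∧
           (deconstruct_biluo_tag p).2 = (deconstruct_biluo_tag r).2) then "-" else r) with hr'
    have hsplit : pre ++ p :: r' :: rest = (pre ++ [p]) ++ r' :: rest := by simp
    rw [hsplit, harr, ih (pre ++ [p]) r']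
    simp only [goA, ← hr', List.append_assoc, List.singleton_append]

-- the validity condition A checks for a current I-tag against corrected previous p'
def condA (p' : String) (b : List Char) : Prop :=
  ((deconL p'.toList).1 = BILUO.B ∨ (deconL p'.toList).1 = BILUO.I) ∧ (deconL p'.toList).2 = b

-- the hypothesis under which A's corrected-prev pass and B's original-prev run pass agree:
-- if the head of 'rest' is an I-tag with body b, A's check on p' matches B's check "p = B-b"
def Hyp (p : Option String) (p' : String) (rest : List String) : Prop :=
  ∀ b : List Char, rest.head? = some (String.ofList ('I' :: '-' :: b)) →
    (condA p' b ↔ p = some (String.ofList ('B' :: '-' :: b)))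

lemma goA_cons (p t : String) (rest : List String) :
    goA p (t :: rest) =
      (if (deconL t.toList).1 = BILUO.I ∧ ¬ (((deconL p.toList).1 = BILUO.B ∨ (deconL p.toList).1 = BILUO.I) ∧ (deconL p.toList).2 = (deconL t.toList).2) then "-" else t) ::
      goA (if (deconL t.toList).1 = BILUO.I ∧ ¬ (((deconL p.toList).1 = BILUO.B ∨ (deconL p.toList).1 = BILUO.I) ∧ (deconL p.toList).2 = (deconL t.toList).2) then "-" else t) rest := by
  simp only [goA, decon_toList, String.ofList_inj]

lemma toList_ofList (l : List Char) : (String.ofList l).toList = l := by simp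

lemma I_tag_toList (t : String) (h : PySem.Str.startswith t "I-" = true) :
    t.toList = 'I' :: '-' :: (deconL t.toList).2 := by
  rw [startswith_isPrefixOf, List.isPrefixOf_iff_prefix] at h
  obtain ⟨s, hs⟩ := h
  have ht : t.toList = 'I' :: '-' :: s := by rw [← hs]; rfl
  rw [ht]; rfl

lemma startswith_I_iff (t : String) :
    PySem.Str.startswith t "I-" = true ↔ ∃ b, t.toList = 'I' :: '-' :: b := by
  constructor
  · intro h; exact ⟨_, I_tag_toList t h⟩
  · rintro ⟨b, hb⟩
    rw [startswith_isPrefixOf, hb]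
    simp [show ("I-").toList = ['I','-'] from rfl, List.isPrefixOf]

lemma type_I_iff (t : String) : (deconL t.toList).1 = BILUO.I ↔ ∃ b, t.toList = 'I' :: '-' :: b := by
  constructor
  · intro h
    unfold deconL at h
    split at h <;> simp_all
  · rintro ⟨b, hb⟩; rw [hb]; rfl

lemma type_B_iff (t : String) : (deconL t.toList).1 = BILUO.B ↔ ∃ b, t.toList = 'B' :: '-' :: b := by
  constructor
  · intro h
    unfold deconL at h
    split at h <;> simp_all
  · rintro ⟨b, hb⟩; rw [hb]; rfl

-- run-peel, valid case: with corrected previous equal to the I-tag t itself, A keeps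
-- every copy of t at the head of rest
lemma goA_run_valid (t : String) (b : List Char) (ht : t.toList = 'I' :: '-' :: b) :
    ∀ rest : List String, goA t rest = rest.takeWhile (· == t) ++ goA t (rest.dropWhile (· == t)) := by
  intro rest
  induction rest with
  | nil => simp
  | cons h rest ih =>
    by_cases hh : h = t
    · subst hh
      rw [goA_cons]
      have hcond : ¬ ((deconL h.toList).1 = BILUO.I ∧ ¬ (((deconL h.toList).1 = BILUO.B ∨ (deconL h.toList).1 = BILUO.I) ∧ (deconL h.toList).2 = (deconL h.toList).2)) := by
        rintro ⟨_, hc⟩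
        exact hc ⟨Or.inr (by rw [ht]; rfl), by rw [ht]⟩
      rw [if_neg hcond]
      simp only [List.takeWhile_cons, List.dropWhile_cons, beq_self_eq_true, if_pos]
      simpa using ih
    · simp [hh]

-- run-peel, invalid case: with corrected previous "-", every I-tag at the head becomes "-"
lemma goA_run_invalid (t : String) (b : List Char) (ht : t.toList = 'I' :: '-' :: b) :
    ∀ rest : List String,
      goA "-" rest = (rest.takeWhile (· == t)).map (fun _ => "-") ++ goA "-" (rest.dropWhile (· == t)) := by
  intro rest
  induction rest with
  | nil => simp
  | cons h rest ih =>
    by_cases hh : h = t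
    · subst hh
      rw [goA_cons]
      have hI : (deconL h.toList).1 = BILUO.I := by rw [ht]; rfl
      have hcond : (deconL h.toList).1 = BILUO.I ∧ ¬ (((deconL ("-" : String).toList).1 = BILUO.B ∨ (deconL ("-" : String).toList).1 = BILUO.I) ∧ (deconL ("-" : String).toList).2 = (deconL h.toList).2) := by
        refine ⟨hI, ?_⟩
        rintro ⟨hc, _⟩
        have : deconL ("-").toList = (BILUO.UNKNOWN, []) := rfl
        rw [this] at hc
        rcases hc with hc | hc <;> simp at hc
      rw [if_pos hcond]
      simp only [List.takeWhile_cons, List.dropWhile_cons, beq_self_eq_true]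
      simpa using ih
    · simp [hh]

lemma head_dropWhile_ne (t : String) (l : List String) :
    ∀ b, (l.dropWhile (· == t)).head? = some b → b ≠ t := by
  induction l with
  | nil => simp
  | cons h rest ih =>
    intro b hb
    rw [List.dropWhile_cons] at hb
    by_cases hh : h = t
    · rw [if_pos (by simp [hh])] at hb; exact ih b hb
    · rw [if_neg (by simp [hh])] at hb
      simp at hb; rw [← hb]; exact hh

-- the main correspondence: A's corrected-prev pass equals B's run pass under Hyp
lemma goA_eq_goR : ∀ (n : Nat) (rest : List String), rest.length ≤ n →
    ∀ (p : Option String) (p' : String), Hyp p p' rest → goA p' rest = goR p rest := by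
  intro n
  induction n with
  | zero =>
    intro rest hl p p' _
    rw [Nat.le_zero, List.length_eq_zero_iff] at hl
    subst hl
    simp [goA, goR]
  | succ n ih =>
    intro rest hlen p p' hyp
    match rest with
    | [] => simp [goA, goR]
    | t :: rest' =>
      by_cases hIt : PySem.Str.startswith t "I-" = true
      · -- t is an I-tag with body b
        obtain ⟨b, hb⟩ := startswith_I_iff t |>.mp hIt
        have hbody : (deconL t.toList).2 = b := by rw [hb]; rfl
        have htI : (deconL t.toList).1 = BILUO.I := by rw [hb]; rfl
        have ht_of : t = String.ofList ('I' :: '-' :: b) := by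
          rw [← String.toList_inj, hb, toList_ofList]
        have hcondiff := hyp b (by rw [← ht_of]; rfl)
        have hBslice : ("B" ++ PySem.Str.slice t (some 1) none) = String.ofList ('B' :: '-' :: b) := by
          rw [← String.toList_inj]
          simp [pysem, hb]
        have hyp' : ∀ (p'' : String), ((deconL p''.toList).1 = BILUO.UNKNOWN ∧ (deconL p''.toList).2 = []) ∨ p'' = t →
            Hyp (some t) p'' (rest'.dropWhile (· == t)) := by
          intro p'' hp'' c hc
          have hne : String.ofList ('I' :: '-' :: c) ≠ t :=
            head_dropWhile_ne t rest' _ hc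
          constructor
          · rintro ⟨h1, h2⟩
            exfalso
            rcases hp'' with ⟨hu, _⟩ | rfl
            · rw [hu] at h1; rcases h1 with h1 | h1 <;> simp at h1
            · -- p'' = t, type I body b; so c = b, making head = t, contradiction
              have : c = b := by
                rcases h1 with h1 | h1
                · rw [htI] at h1; simp at h1
                · rw [hbody] at h2; exact h2.symm
              exact hne (by rw [this, ← ht_of])
          · intro hsome
            exfalso
            have : t = String.ofList ('B' :: '-' :: c) := by injection hsome
            rw [← String.toList_inj, hb, toList_ofList] at this
            simp at this
        have hlen' : (rest'.dropWhile (· == t)).length ≤ n :=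
          le_trans (List.length_dropWhile_le _ _) (by simpa using Nat.le_of_succ_le_succ hlen)
        rw [goA_cons]
        by_cases hvalid : condA p' b
        · -- valid: kept, run kept
          have hp : p = some (String.ofList ('B' :: '-' :: b)) := hcondiff.mp hvalid
          have hcnd : ¬ ((deconL t.toList).1 = BILUO.I ∧ ¬ (((deconL p'.toList).1 = BILUO.B ∨ (deconL p'.toList).1 = BILUO.I) ∧ (deconL p'.toList).2 = (deconL t.toList).2)) := by
            rw [hbody]; rintro ⟨_, hc⟩; exact hc hvalid
          rw [if_neg hcnd]
          rw [goA_run_valid t b hb rest']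
          show t :: (_ ++ goA t _) = goR p (t :: rest')
          rw [ih _ hlen' (some t) t (hyp' t (Or.inr rfl))]
          conv_rhs => rw [goR]
          rw [if_pos hIt]
          simp [hBslice, hp]
        · -- invalid: whole run becomes "-"
          have hp : p ≠ some (String.ofList ('B' :: '-' :: b)) := fun h => hvalid (hcondiff.mpr h)
          have hcnd : (deconL t.toList).1 = BILUO.I ∧ ¬ (((deconL p'.toList).1 = BILUO.B ∨ (deconL p'.toList).1 = BILUO.I) ∧ (deconL p'.toList).2 = (deconL t.toList).2) :=
            ⟨htI, by rw [hbody]; exact hvalid⟩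
          rw [if_pos hcnd]
          rw [goA_run_invalid t b hb rest']
          rw [ih _ hlen' (some t) "-" (hyp' "-" (Or.inl ⟨rfl, rfl⟩))]
          conv_rhs => rw [goR]
          rw [if_pos hIt]
          simp [hBslice, hp, List.map_const', List.replicate_add]
      · -- t not an I-tag: kept unchanged, prev becomes t on both sides
        have htnI : (deconL t.toList).1 ≠ BILUO.I := fun hEq =>
          hIt ((startswith_I_iff t).mpr ((type_I_iff t).mp hEq))
        have hcnd : ¬ ((deconL t.toList).1 = BILUO.I ∧ ¬ (((deconL p'.toList).1 = BILUO.B ∨ (deconL p'.toList).1 = BILUO.I) ∧ (deconL p'.toList).2 = (deconL t.toList).2)) := by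
          rintro ⟨h1, _⟩; exact htnI h1
        rw [goA_cons, if_neg hcnd]
        have hyp'' : Hyp (some t) t rest' := by
          intro c hc
          constructor
          · rintro ⟨h1, h2⟩
            rcases h1 with h1 | h1
            · -- type B with body c: t = "B-"++c
              obtain ⟨d, hd⟩ := (type_B_iff t).mp h1
              have hbody2 : (deconL t.toList).2 = d := by rw [hd]; rfl
              congr 1
              rw [← String.toList_inj, toList_ofList, hd, ← h2, hbody2]
            · exact absurd h1 htnI
          · intro hsome
            have ht3 : t = String.ofList ('B' :: '-' :: c) := by injection hsome
            have : t.toList = 'B' :: '-' :: c := by rw [ht3, toList_ofList]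
            refine ⟨Or.inl (by rw [this]; rfl), by rw [this]; rfl⟩
        rw [ih rest' (by simpa using Nat.le_of_succ_le_succ hlen) (some t) t hyp'']
        conv_rhs => rw [goR]
        rw [if_neg (show ¬ PySem.Str.startswith t "I-" = true from hIt)]

-- ===== VERDICT (by name: the statement is the Claim_ definition above) =====
theorem correct_bio_tags_spec : Claim_equal_correct_bio_tags := by
  intro tags _
  show correct_bio_tags tags = correct_bio_tags_alt tags
  unfold correct_bio_tags correct_bio_tags_alt
  simp only [List.singleton_append]
  have h := loopA_eq_goA tags [] "O"
  simp only [List.length_nil, Nat.cast_zero, zero_add, List.nil_append] at h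
  have hb : (((("O" :: tags) : List String).length : Int) - 1) = (tags.length : Int) := by
    push_cast [List.length_cons]; ring
  rw [hb, h]
  have hO : Hyp none "O" tags := by
    intro b _
    constructor
    · rintro ⟨h1, _⟩
      have : deconL ("O").toList = (BILUO.O, []) := rfl
      rw [this] at h1; rcases h1 with h1 | h1 <;> simp at h1
    · intro h1; simp at h1
  rw [goA_eq_goR tags.length tags le_rfl none "O" hO]
  simp [pysem]
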